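-- pv_equiv track=rewrite | github.com/amazon-ion/ion-test-driver | amazon/iontest/ion_test_driver.py | are_lists_agree
-- ===== SOURCE A (Python) =====
-- def is_name_in_lists(lists, name):
--     for k in lists.keys():
--         if name in lists[k]:
--             return True
--     return False
--
-- def are_lists_agree(first_lists, second_lists):
--     for k in first_lists.keys():
--         if is_name_in_lists(second_lists, k):
--             return False
--     for k in second_lists.keys():
--         if is_name_in_lists(first_lists, k):
--             return False
--     return True
-- ===== SOURCE B (Python) =====
-- def are_lists_agree(first_lists, second_lists):
--     # Idiomatic rewrite: traverse the VALUE lists once, testing each element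
--     # against a prebuilt key-set of the other dict (no helper, no inner key scan).
--     first_keys = set(first_lists)
--     second_keys = set(second_lists)
--     for values in second_lists.values():
--         for v in values:
--             if v in first_keys:
--                 return False
--     for values in first_lists.values():
--         for v in values:
--             if v in second_keys:
--                 return False
--     return True
-- ===== Notes on version B (the rewrite author's own statement) =====
-- stated objective: idiomatic
-- what changed: Reverses the traversal: instead of iterating over one dict's keys and re-scanning every value list of the other dict via a helper, B builds each dict's key-set once and makes a single pass over the value lists, testing each element against the opposite key-set.
import Mathlib
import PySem

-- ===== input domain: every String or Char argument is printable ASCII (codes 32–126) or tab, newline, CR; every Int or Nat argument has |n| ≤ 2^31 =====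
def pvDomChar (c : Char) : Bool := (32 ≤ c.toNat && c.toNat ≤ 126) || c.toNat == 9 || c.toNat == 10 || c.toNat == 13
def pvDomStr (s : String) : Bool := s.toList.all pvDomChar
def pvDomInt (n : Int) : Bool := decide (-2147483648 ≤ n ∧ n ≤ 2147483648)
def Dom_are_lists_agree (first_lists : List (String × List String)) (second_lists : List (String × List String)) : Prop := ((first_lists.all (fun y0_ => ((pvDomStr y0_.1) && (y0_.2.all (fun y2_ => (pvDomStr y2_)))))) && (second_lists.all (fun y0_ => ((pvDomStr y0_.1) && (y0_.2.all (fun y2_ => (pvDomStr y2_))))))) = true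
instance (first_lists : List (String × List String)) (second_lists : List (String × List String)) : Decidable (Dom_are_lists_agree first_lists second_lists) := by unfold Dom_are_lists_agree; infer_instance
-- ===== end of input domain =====

-- B reverses A's traversal: it builds each dict's key-set once and scans the value
-- lists against it, instead of iterating keys and re-scanning the other dict's lists
-- (objective: idiomatic; same results everywhere).

-- ===== PORT A =====
-- helper: for k in lists.keys(): if name in lists[k]: return True / return False
def is_name_in_lists (lists : PySem.Dict String (List String)) (name : String) : Bool :=
  lists.keys.any (fun k => (lists.getD k []).contains name)

def are_lists_agree (first_lists : List (String × List String)) (second_lists : List (String × List String)) : Bool :=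
  if (PySem.Dict.ofList first_lists).keys.any (fun k => is_name_in_lists (PySem.Dict.ofList second_lists) k) then false
  else if (PySem.Dict.ofList second_lists).keys.any (fun k => is_name_in_lists (PySem.Dict.ofList first_lists) k) then false
  else true

-- ===== PORT B =====
def are_lists_agree_alt (first_lists : List (String × List String)) (second_lists : List (String × List String)) : Bool :=
  if (PySem.Dict.ofList second_lists).values.any (fun vs => vs.any (fun v => PySem.Set.contains (PySem.Set.ofList (PySem.Dict.ofList first_lists).keys) v)) then false
  else if (PySem.Dict.ofList first_lists).values.any (fun vs => vs.any (fun v => PySem.Set.contains (PySem.Set.ofList (PySem.Dict.ofList second_lists).keys) v)) then false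
  else true

-- ===== PRECONDITION & SPEC =====
def Spec_are_lists_agree (first_lists : List (String × List String)) (second_lists : List (String × List String)) (out : Bool) : Prop := out = are_lists_agree_alt first_lists second_lists
instance (first_lists : List (String × List String)) (second_lists : List (String × List String)) (out : Bool) : Decidable (Spec_are_lists_agree first_lists second_lists out) := by unfold Spec_are_lists_agree; infer_instance

-- ===== CLAIM (what is proved, stated in full; the proofs are below) =====
def Claim_equal_are_lists_agree : Prop := ∀ (first_lists : List (String × List String)) (second_lists : List (String × List String)), Dom_are_lists_agree first_lists second_lists → Spec_are_lists_agree first_lists second_lists (are_lists_agree first_lists second_lists)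

-- ===== LEMMAS AND PROOFS =====

-- swapping the two nested existential scans
theorem cross_scan_comm (ks : List String) (d : PySem.Dict String (List String))
    (hnd : d.keys.Nodup) :
    ks.any (fun k => d.keys.any (fun k' => (d.getD k' []).contains k))
      = d.values.any (fun vs => vs.any (fun v => PySem.Set.contains (PySem.Set.ofList ks) v)) := by
  rw [PySem.Dict.values_eq_map_keys d hnd [], List.any_map, Bool.eq_iff_iff]
  simp only [List.any_eq_true, List.contains_eq_mem, PySem.Set.contains,
    PySem.Set.mem_ofList, decide_eq_true_eq, Function.comp_apply]
  constructor
  · rintro ⟨k, hk, k', hk', hmem⟩; exact ⟨k', hk', k, hmem, hk⟩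
  · rintro ⟨k', hk', v, hv, hvk⟩; exact ⟨v, hvk, k', hk', hv⟩

theorem are_lists_agree_eq_alt (first_lists second_lists : List (String × List String)) :
    are_lists_agree first_lists second_lists = are_lists_agree_alt first_lists second_lists := by
  unfold are_lists_agree are_lists_agree_alt is_name_in_lists
  rw [cross_scan_comm (PySem.Dict.ofList first_lists).keys (PySem.Dict.ofList second_lists) (PySem.Dict.nodup_keys_ofList _),
      cross_scan_comm (PySem.Dict.ofList second_lists).keys (PySem.Dict.ofList first_lists) (PySem.Dict.nodup_keys_ofList _)]

-- ===== VERDICT (by name: the statement is the Claim_ definition above) =====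
theorem are_lists_agree_spec : Claim_equal_are_lists_agree := by
  intro f s _
  unfold Spec_are_lists_agree
  exact are_lists_agree_eq_alt f s
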